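-- pv_equiv track=rewrite | github.com/JooHyukGallagher/- | 프로그래머스/Python/level2/후보키.py | solution
-- ===== SOURCE A (Python) =====
-- from itertools import combinations
--
-- def makeKeys(relation, keys, row_num):
--     resultKey = []
--
--     for i in range(row_num):
--         keyElement = ""
--         for key in keys:
--             keyElement += relation[i][key]
--         resultKey.append(keyElement)
--
--     return resultKey
--
-- def isOne(tupleList):
--     key_set = set()
--
--     for tuple in tupleList:
--         if tuple not in key_set:
--             key_set.add(tuple)
--
--     if len(key_set) == len(tupleList):
--         return True
--     else:
--         return False
--
-- def solution(relation):
--     answer = 0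
--
--     row_num = len(relation)
--     column_num = len(relation[0])
--
--     candidates = []
--     for i in range(1, column_num+1):
--         candidates.extend(combinations(range(column_num), i))
--
--     key_dict = {}
--     for keys in candidates:
--         if keys not in key_dict:
--             tupleList = makeKeys(relation, keys, row_num)
--             if isOne(tupleList):
--                 answer += 1
--
--     return answer
-- ===== SOURCE B (Python) =====
-- def solution(relation):
--     n = len(relation)
--     cols = list(range(len(relation[0])))
--
--     def rec(cs, proj, nonempty):
--         if not cs:
--             return 1 if nonempty and len(set(proj)) == n else 0
--         c, rest = cs[0], cs[1:]
--         taken = [p + row[c] for p, row in zip(proj, relation)]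
--         return rec(rest, proj, nonempty) + rec(rest, taken, True)
--
--     return rec(cols, [""] * n, False)
-- ===== Notes on version B (the rewrite author's own statement) =====
-- stated objective: alternative
-- what changed: Replaced the itertools.combinations enumeration that rebuilds every projection string from scratch per subset with a recursion over columns that shares the per-row prefix strings between subsets, and dropped A's dead key_dict; measured ~3x at n=256 but both remain exponential in the column count, so no speed is claimed.
import Mathlib
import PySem

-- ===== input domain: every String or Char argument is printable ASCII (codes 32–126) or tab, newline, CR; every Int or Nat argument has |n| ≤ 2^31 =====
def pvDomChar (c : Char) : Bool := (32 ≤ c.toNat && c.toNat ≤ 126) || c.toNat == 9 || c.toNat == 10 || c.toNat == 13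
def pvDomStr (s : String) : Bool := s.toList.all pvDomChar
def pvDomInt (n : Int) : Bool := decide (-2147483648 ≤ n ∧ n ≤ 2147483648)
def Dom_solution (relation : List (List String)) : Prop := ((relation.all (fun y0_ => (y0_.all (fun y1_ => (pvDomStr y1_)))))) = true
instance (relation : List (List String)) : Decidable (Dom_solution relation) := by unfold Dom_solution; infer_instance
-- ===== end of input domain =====

-- B replaces A's per-subset itertools.combinations rebuild with a column recursion that
-- shares per-row prefix strings between subsets (alternative algorithm; dead key_dict dropped).

-- ===== PORT A =====

-- itertools.combinations(range C, k) of column indices, lexicographic by position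
def combosA : Nat → List Nat → List (List Nat)
  | 0, _ => [[]]
  | _ + 1, [] => []
  | k + 1, x :: xs => (combosA k xs).map (fun s => x :: s) ++ combosA (k + 1) xs

-- relation[i][key] (both indexings in range on Pre_)
def cellA (relation : List (List String)) (i : Nat) (key : Nat) : String :=
  (PySem.List.pyGet? ((PySem.List.pyGet? relation (i : Int)).getD []) (key : Int)).getD ""

def makeKeys (relation : List (List String)) (keys : List Nat) (row_num : Nat) : List String :=
  (List.range row_num).foldl
    (fun resultKey i =>
      resultKey ++ [keys.foldl (fun keyElement key => keyElement ++ cellA relation i key) ""])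
    []

def isOne (tupleList : List String) : Bool :=
  let key_set := tupleList.foldl
    (fun s t => if !(PySem.Set.contains s t) then PySem.Set.add s t else s) PySem.Set.empty
  key_set.length == tupleList.length

def solution (relation : List (List String)) : Int :=
  let row_num := relation.length
  let column_num := relation.headI.length
  let candidates := (List.range column_num).foldl
    (fun acc i => acc ++ combosA (i + 1) (List.range column_num)) []
  let st := candidates.foldl
    (fun (st : Int × PySem.Dict (List Nat) Unit) keys =>
      if !(PySem.Dict.contains st.2 keys) then
        (if isOne (makeKeys relation keys row_num) then st.1 + 1 else st.1, st.2)
      else st)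
    (0, PySem.Dict.empty)
  st.1

-- ===== PORT B =====

-- [p + row[c] for p, row in zip(proj, relation)]
def extB (relation : List (List String)) (proj : List String) (c : Nat) : List String :=
  List.zipWith (fun p row => p ++ (PySem.List.pyGet? row (c : Int)).getD "") proj relation

def recB (relation : List (List String)) (n : Nat) :
    List Nat → List String → Bool → Int
  | [], proj, nonempty =>
      if nonempty && ((PySem.Set.ofList proj).length == n) then 1 else 0
  | c :: rest, proj, nonempty =>
      recB relation n rest proj nonempty + recB relation n rest (extB relation proj c) true

def solution_alt (relation : List (List String)) : Int :=
  let n := relation.length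
  let cols := List.range relation.headI.length
  recB relation n cols (List.replicate n "") false

-- ===== PRECONDITION & SPEC =====
-- Pre_ excludes exactly the inputs where the Python raises IndexError: the empty relation
-- (relation[0]) and ragged relations with a row shorter than the first row.
def Pre_solution (relation : List (List String)) : Prop :=
  relation ≠ [] ∧ ∀ row ∈ relation, relation.headI.length ≤ row.length
instance (relation : List (List String)) : Decidable (Pre_solution relation) := by
  unfold Pre_solution; infer_instance

def pvWitness_solution : List (List String) := [["a", "b"], ["c", "b"]]

def Spec_solution (relation : List (List String)) (out : Int) : Prop := out = solution_alt relation
instance (relation : List (List String)) (out : Int) : Decidable (Spec_solution relation out) := by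
  unfold Spec_solution; infer_instance

-- ===== CLAIM (what is proved, stated in full; the proofs are below) =====
def Claim_equal_solution : Prop := ∀ (relation : List (List String)), Dom_solution relation → Pre_solution relation → Spec_solution relation (solution relation)

-- ===== LEMMAS AND PROOFS =====

-- enumeration of all subsets of a list of column indices
def subsets : List Nat → List (List Nat)
  | [] => [[]]
  | x :: xs => subsets xs ++ (subsets xs).map (fun s => x :: s)

-- sum of f over a list
theorem sum_map_add (l : List Nat) (f g : Nat → Int) :
    (l.map (fun i => f i + g i)).sum = (l.map f).sum + (l.map g).sum := by
  induction l with
  | nil => simp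
  | cons x xs ih => simp [ih]; ring

theorem sum_flatMap' {α : Type} (l : List α) (f : α → List Int) :
    (l.flatMap f).sum = (l.map (fun a => (f a).sum)).sum := by
  induction l with
  | nil => simp
  | cons x xs ih => simp [List.flatMap_cons, List.sum_append, ih]

theorem combosA_gt (l : List Nat) : ∀ k, l.length < k → combosA k l = [] := by
  induction l with
  | nil => intro k hk; cases k with
    | zero => omega
    | succ k => simp [combosA]
  | cons x xs ih =>
    intro k hk
    cases k with
    | zero => omega
    | succ k =>
      simp only [combosA]
      rw [ih k (by simpa using hk), ih (k + 1) (by simp at hk ⊢; omega)]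
      simp

theorem mem_combosA_ne_nil (l : List Nat) : ∀ k S, S ∈ combosA (k + 1) l → S ≠ [] := by
  induction l with
  | nil => intro k S h; simp [combosA] at h
  | cons x xs ih =>
    intro k S h
    simp only [combosA, List.mem_append, List.mem_map] at h
    rcases h with ⟨s, _, rfl⟩ | h
    · simp
    · exact ih k S h

-- the key combinatorial identity: size-grouped combinations vs. the subset enumeration
theorem combos_subsets (xs : List Nat) (g : List Nat → Int) :
    g [] + ((List.range xs.length).map (fun i => ((combosA (i + 1) xs).map g).sum)).sum
      = ((subsets xs).map g).sum := by
  induction xs generalizing g with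
  | nil => simp [subsets]
  | cons x l ih =>
    have hsplit : ∀ i, ((combosA (i + 1) (x :: l)).map g).sum
        = ((combosA i l).map (fun s => g (x :: s))).sum + ((combosA (i + 1) l).map g).sum := by
      intro i
      simp [combosA, List.map_append, List.sum_append, List.map_map, Function.comp_def]
    calc g [] + ((List.range (x :: l).length).map
            (fun i => ((combosA (i + 1) (x :: l)).map g).sum)).sum
        = g [] + ((List.range (l.length + 1)).map
            (fun i => ((combosA i l).map (fun s => g (x :: s))).sum
              + ((combosA (i + 1) l).map g).sum)).sum := by
          simp only [List.length_cons]
          congr 1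
          exact congrArg List.sum (List.map_congr_left (fun i _ => hsplit i))
      _ = ((subsets l).map g).sum + ((subsets l).map (fun s => g (x :: s))).sum := by
          rw [sum_map_add]
          have h1 : ((List.range (l.length + 1)).map
              (fun i => ((combosA i l).map (fun s => g (x :: s))).sum)).sum
              = g (x :: []) + ((List.range l.length).map
                  (fun i => ((combosA (i + 1) l).map (fun s => g (x :: s))).sum)).sum := by
            rw [List.range_succ_eq_map]
            simp [combosA, List.map_map, Function.comp_def]
          have h2 : ((List.range (l.length + 1)).map
              (fun i => ((combosA (i + 1) l).map g).sum)).sum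
              = ((List.range l.length).map (fun i => ((combosA (i + 1) l).map g).sum)).sum := by
            rw [List.range_succ]
            simp [combosA_gt l (l.length + 1) (by omega)]
          rw [h1, h2]
          rw [← ih g, ← ih (fun s => g (x :: s))]
          ring
      _ = ((subsets (x :: l)).map g).sum := by
          simp [subsets, List.map_append, List.sum_append, List.map_map, Function.comp_def]
          try ring

-- B's recursion computes the subset sum of leaves
theorem recB_eq_subsets (relation : List (List String)) (n : Nat) :
    ∀ (cs : List Nat) (proj : List String) (ne : Bool),
      recB relation n cs proj ne
        = ((subsets cs).map (fun S =>
            if (ne || !S.isEmpty) && ((PySem.Set.ofList (S.foldl (extB relation) proj)).length == n)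
            then (1 : Int) else 0)).sum := by
  intro cs
  induction cs with
  | nil => intro proj ne; simp [recB, subsets]
  | cons c rest ih =>
    intro proj ne
    simp only [recB, subsets, List.map_append, List.sum_append, List.map_map, Function.comp_def]
    rw [ih proj ne, ih (extB relation proj c) true]
    simp [List.foldl_cons]

-- zipWith fusion helper
theorem zipWith_zipWith_right {α β γ : Type} (g : γ → β → γ) (h : α → β → γ) :
    ∀ (l1 : List α) (l2 : List β),
      List.zipWith g (List.zipWith h l1 l2) l2 = List.zipWith (fun a b => g (h a b) b) l1 l2 := by
  intro l1
  induction l1 with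
  | nil => intro l2; simp
  | cons x xs ih => intro l2; cases l2 with
    | nil => simp
    | cons y ys => simp [ih]

theorem zipWith_left {α β : Type} :
    ∀ (l1 : List α) (l2 : List β), l1.length ≤ l2.length →
      List.zipWith (fun a _ => a) l1 l2 = l1 := by
  intro l1
  induction l1 with
  | nil => intro l2 _; simp
  | cons x xs ih => intro l2 h; cases l2 with
    | nil => simp at h
    | cons y ys => simp at h ⊢; exact ih ys h

-- the accumulated projection is the per-row fold of the chosen columns
theorem foldl_extB (relation : List (List String)) :
    ∀ (S : List Nat) (starts : List String), starts.length = relation.length →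
      S.foldl (extB relation) starts
        = List.zipWith
            (fun st row => S.foldl
              (fun a (k : Nat) => a ++ (PySem.List.pyGet? row (k : Int)).getD "") st)
            starts relation := by
  intro S
  induction S with
  | nil => intro starts h; simp [zipWith_left starts relation (le_of_eq h)]
  | cons c S ih =>
    intro starts h
    have hlen : (extB relation starts c).length = relation.length := by
      simp [extB, h]
    rw [List.foldl_cons, ih (extB relation starts c) hlen]
    simp only [extB, zipWith_zipWith_right]
    simp [List.foldl_cons]

theorem zipWith_replicate_left {α β γ : Type} (f : α → β → γ) (a : α) :
    ∀ (l : List β), List.zipWith f (List.replicate l.length a) l = l.map (f a) := by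
  intro l
  induction l with
  | nil => simp
  | cons x xs ih => simpa [List.replicate_succ] using ih

-- makeKeys as a map over the rows
theorem makeKeys_eq_map (relation : List (List String)) (keys : List Nat) :
    makeKeys relation keys relation.length
      = relation.map (fun row =>
          keys.foldl (fun a (k : Nat) => a ++ (PySem.List.pyGet? row (k : Int)).getD "") "") := by
  unfold makeKeys
  rw [PySem.List.foldl_append_singleton_eq_map]
  simp only [List.nil_append]
  apply List.ext_getElem
  · simp
  · intro i h1 h2
    simp only [List.getElem_map, List.getElem_range]
    apply List.foldl_ext
    intro a k _
    simp at h1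
    simp [cellA, PySem.List.pyGet?_natCast, List.getElem?_eq_getElem h1]

theorem isOne_eq (tl : List String) :
    isOne tl = ((PySem.Set.ofList tl).length == tl.length) := by
  have h : tl.foldl (fun s t => if !(PySem.Set.contains s t) then PySem.Set.add s t else s)
      PySem.Set.empty = PySem.Set.ofList tl := by
    rw [PySem.Set.ofList_eq_foldl]
    apply List.foldl_ext
    intro s t _
    simp [PySem.Set.add]
  simp only [isOne, h]

-- A's fold over candidates with the (never-written) dict is a plain indicator sum
theorem foldA_eq_sum (relation : List (List String)) (row_num : Nat) :
    ∀ (cands : List (List Nat)) (a : Int),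
      (cands.foldl
        (fun (st : Int × PySem.Dict (List Nat) Unit) keys =>
          if !(PySem.Dict.contains st.2 keys) then
            (if isOne (makeKeys relation keys row_num) then st.1 + 1 else st.1, st.2)
          else st)
        (a, PySem.Dict.empty)).1
      = a + (cands.map (fun keys =>
          if isOne (makeKeys relation keys row_num) then (1 : Int) else 0)).sum := by
  intro cands
  induction cands with
  | nil => simp
  | cons k ks ih =>
    intro a
    simp only [List.foldl_cons, PySem.Dict.contains_empty, Bool.not_false, if_true,
      List.map_cons, List.sum_cons]
    rw [ih]
    by_cases h : isOne (makeKeys relation k row_num) <;> (simp [h]; try ring)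

-- ===== VERDICT (by name: the statement is the Claim_ definition above) =====
theorem solution_spec : Claim_equal_solution := by
  intro relation _hdom _hpre
  unfold Spec_solution
  unfold solution solution_alt
  simp only []
  set n := relation.length with hn
  set C := relation.headI.length with hC
  -- A side: fold to flatMap, then sum
  rw [PySem.List.foldl_append_eq_flatMap, List.nil_append, foldA_eq_sum, zero_add]
  -- B side: subset sum
  rw [recB_eq_subsets]
  simp only [Bool.false_or]
  -- indicator function of A, extended with the empty-subset leaf, equals B's leaf function
  have key := combos_subsets (List.range C)
    (fun S => if (!S.isEmpty) && ((PySem.Set.ofList (S.foldl (extB relation) (List.replicate n ""))).length == n)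
      then (1 : Int) else 0)
  simp only [List.isEmpty_nil, Bool.not_true, Bool.false_and, Bool.false_eq_true, if_false,
    zero_add, List.length_range] at key
  rw [← key]
  rw [List.map_flatMap, sum_flatMap']
  congr 1
  apply List.map_congr_left
  intro i _
  congr 1
  apply List.map_congr_left
  intro S hS
  have hSne : S ≠ [] := mem_combosA_ne_nil (List.range C) i S hS
  have hmk : makeKeys relation S n
      = S.foldl (extB relation) (List.replicate n "") := by
    rw [hn, makeKeys_eq_map]
    rw [foldl_extB relation S (List.replicate relation.length "") (by simp)]
    rw [← hn]
    have := zipWith_replicate_left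
      (fun (st : String) (row : List String) => S.foldl
        (fun a (k : Nat) => a ++ (PySem.List.pyGet? row (k : Int)).getD "") st) "" relation
    rw [hn]
    simpa using this.symm
  rw [isOne_eq, hmk]
  have hlen : (S.foldl (extB relation) (List.replicate n "")).length = n := by
    have : ∀ (T : List Nat) (p : List String), p.length = n → (T.foldl (extB relation) p).length = n := by
      intro T
      induction T with
      | nil => intro p hp; simpa using hp
      | cons c T ih => intro p hp; rw [List.foldl_cons]; exact ih _ (by simp [extB, hp, hn])
    exact this S _ (by simp)
  rw [hlen]
  simp [hSne]
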